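-- pv_equiv track=rewrite | github.com/variability2026-submission/replication-package | fca_core.py | find_implications
-- ===== SOURCE A (Python) =====
-- from typing import Dict, FrozenSet, Set, Tuple
--
-- Context = Dict[str, Set[str]]
--
-- Implication = Tuple[FrozenSet[str], FrozenSet[str]]
--
-- def prime_objects(context: Context, attributes: Set[str]) -> Set[str]:
--     """A' -- objects that have ALL attributes in A."""
--     if not attributes:
--         return set(context.keys())
--     return {obj for obj, attrs in context.items() if attributes <= attrs}
--
-- def prime_attributes(context: Context, objects: Set[str]) -> Set[str]:
--     """B' -- attributes shared by ALL objects in B."""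
--     if not objects:
--         # Convention: empty object set → union of all attributes
--         return set().union(*context.values()) if context else set()
--     result: Set[str] | None = None
--     for obj in objects:
--         if result is None:
--             result = context[obj].copy()
--         else:
--             result &= context[obj]
--     return result if result is not None else set()
--
-- def closure(context: Context, attributes: Set[str]) -> Set[str]:
--     """A'' -- double prime / closure of an attribute set."""
--     return prime_attributes(context, prime_objects(context, attributes))
--
-- def find_implications(context: Context) -> list[Implication]:
--     """
--     Find implications from empty-set and single-attribute premises.
--
--     Returns a list of (premise, full_closure) tuples where the closure
--     contains attributes beyond the premise.  For the small contexts used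
--     in the paper (6–8 objects, 8–9 attributes), this covers the
--     structurally interesting implications; pair-premise implications are
--     computed separately where needed (see impossibility check below).
--     """
--     all_attrs = set().union(*context.values())
--     implications: list[Implication] = []
--
--     # Empty premise → commonalities
--     common = closure(context, set())
--     if common:
--         implications.append((frozenset(), frozenset(common)))
--
--     # Single-attribute premises
--     for attr in sorted(all_attrs):
--         c = closure(context, {attr})
--         if c - {attr}:
--             implications.append((frozenset({attr}), frozenset(c)))
--
--     return implications
-- ===== SOURCE B (Python) =====
-- def find_implications(context):
--     """Implications from empty/singleton premises via an inverted index of attribute extents."""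
--     all_objects = frozenset(context.keys())
--     all_attrs = set().union(*context.values())
--     extent = {b: frozenset(o for o, attrs in context.items() if b in attrs)
--               for b in all_attrs}
--     implications = []
--     common = {b for b in all_attrs if extent[b] == all_objects}
--     if common:
--         implications.append((frozenset(), frozenset(common)))
--     for attr in sorted(all_attrs):
--         ea = extent[attr]
--         c = {b for b in all_attrs if ea <= extent[b]}
--         if c - {attr}:
--             implications.append((frozenset({attr}), frozenset(c)))
--     return implications
-- ===== Notes on version B (the rewrite author's own statement) =====
-- stated objective: alternative
-- what changed: B replaces A's prime/double-prime closure machinery (intersecting the attribute sets of matched objects) with an inverted view: each attribute's extent (set of objects carrying it), emitting the empty-premise implication when an extent equals all objects and singleton-premise closures as extent-subset comparisons.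
import Mathlib
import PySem

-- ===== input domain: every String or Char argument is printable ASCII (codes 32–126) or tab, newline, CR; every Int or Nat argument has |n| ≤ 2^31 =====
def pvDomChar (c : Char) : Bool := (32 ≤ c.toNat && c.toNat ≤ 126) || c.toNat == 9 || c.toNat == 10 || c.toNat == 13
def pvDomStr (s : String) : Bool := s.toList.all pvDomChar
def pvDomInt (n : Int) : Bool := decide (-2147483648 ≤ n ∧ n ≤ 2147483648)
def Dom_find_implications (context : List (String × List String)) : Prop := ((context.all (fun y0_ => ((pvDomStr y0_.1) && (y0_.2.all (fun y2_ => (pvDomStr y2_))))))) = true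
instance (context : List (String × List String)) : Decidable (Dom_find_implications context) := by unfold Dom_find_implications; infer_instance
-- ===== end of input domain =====

-- B replaces A's prime/double-prime closure computation by attribute extents compared with
-- subset tests (alternative algorithm, similar cost). Python frozensets have no observable
-- order; both ports represent each output frozenset canonically as its sorted element list.

-- ===== PORT A =====
-- canonical list representation of a frozenset (shared by both ports)
def pvSortedSet (s : List String) : List String := PySem.List.sorted s (fun x => x) false

-- set().union(*context.values())
def pvUnionValues (ctx : PySem.Dict String (List String)) : List String :=
  ctx.values.foldl (fun s v => PySem.Set.update s v) PySem.Set.empty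

def pvPrimeObjects (ctx : PySem.Dict String (List String)) (attributes : List String) : List String :=
  if attributes = [] then PySem.Set.ofList ctx.keys
  else PySem.Set.ofList ((ctx.items.filter (fun p => PySem.Set.issubset attributes p.2)).map (·.1))

-- context[obj] is ported as ctx.getD obj []: within find_implications the objects handed to
-- prime_attributes are always keys of ctx, so Python's KeyError is unreachable.
def pvPrimeAttributes (ctx : PySem.Dict String (List String)) (objects : List String) : List String :=
  if objects = [] then (if ctx.items = [] then [] else pvUnionValues ctx)
  else
    (objects.foldl
      (fun (result : Option (List String)) obj =>
        match result with
        | none => some (PySem.Set.ofList (ctx.getD obj []))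
        | some r => some (PySem.Set.inter r (ctx.getD obj [])))
      none).getD []

def pvClosure (ctx : PySem.Dict String (List String)) (attributes : List String) : List String :=
  pvPrimeAttributes ctx (pvPrimeObjects ctx attributes)

def find_implications (context : List (String × List String)) : List (List String × List String) :=
  let ctx := PySem.Dict.ofList context
  let allAttrs := pvUnionValues ctx
  let common := pvClosure ctx []
  let implications : List (List String × List String) :=
    if common = [] then [] else [(([] : List String), pvSortedSet common)]
  (PySem.List.sorted allAttrs (fun x => x) false).foldl
    (fun acc attr =>
      let c := pvClosure ctx [attr]
      if PySem.Set.diff c [attr] = [] then acc else acc ++ [([attr], pvSortedSet c)])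
    implications

-- ===== PORT B =====
-- extent(b) = frozenset(o for o, attrs in context.items() if b in attrs)
def pvExtent (items : List (String × List String)) (b : String) : List String :=
  PySem.Set.ofList ((items.filter (fun p => p.2.contains b)).map (·.1))

def find_implications_alt (context : List (String × List String)) : List (List String × List String) :=
  let ctx := PySem.Dict.ofList context
  let allObjects := PySem.Set.ofList ctx.keys
  let allAttrs := pvUnionValues ctx
  let extent := allAttrs.foldl (fun d b => d.insert b (pvExtent ctx.items b))
    (PySem.Dict.empty : PySem.Dict String (List String))
  let implications : List (List String × List String) := []
  let common := allAttrs.filter (fun b => PySem.Set.equal (extent.getD b []) allObjects)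
  let implications := if common = [] then implications
    else implications ++ [(([] : List String), pvSortedSet common)]
  (PySem.List.sorted allAttrs (fun x => x) false).foldl
    (fun acc attr =>
      let ea := extent.getD attr []
      let c := allAttrs.filter (fun b => PySem.Set.issubset ea (extent.getD b []))
      if PySem.Set.diff c [attr] = [] then acc else acc ++ [([attr], pvSortedSet c)])
    implications

-- ===== PRECONDITION & SPEC =====
def Spec_find_implications (context : List (String × List String)) (out : List (List String × List String)) : Prop := out = find_implications_alt context
instance (context : List (String × List String)) (out : List (List String × List String)) : Decidable (Spec_find_implications context out) := by unfold Spec_find_implications; infer_instance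

-- ===== CLAIM (what is proved, stated in full; the proofs are below) =====
def Claim_equal_find_implications : Prop := ∀ (context : List (String × List String)), Dom_find_implications context → Spec_find_implications context (find_implications context)


-- ===== LEMMAS AND PROOFS =====

-- items with Nodup keys are determined by their key
theorem pv_key_inj (ctx : PySem.Dict String (List String)) (hnd : ctx.keys.Nodup)
    {p q : String × List String} (hp : p ∈ ctx.items) (hq : q ∈ ctx.items) (he : p.1 = q.1) :
    p = q :=
  List.inj_on_of_nodup_map (by simpa [PySem.Dict.keys] using hnd) hp hq he

-- the option-valued accumulator of prime_attributes, once seeded, is a plain fold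
theorem pv_foldl_opt (g : List String → String → List String) (f0 : String → List String)
    (os : List String) (r : List String) :
    os.foldl (fun acc obj => match acc with
      | none => some (f0 obj)
      | some r => some (g r obj)) (some r) = some (os.foldl g r) := by
  induction os generalizing r with
  | nil => rfl
  | cons o os ih => simpa using ih (g r o)

theorem pv_mem_foldl_update (vs : List (List String)) (init : List String) (x : String) :
    x ∈ vs.foldl (fun s v => PySem.Set.update s v) init ↔ x ∈ init ∨ ∃ v ∈ vs, x ∈ v := by
  induction vs generalizing init with
  | nil => simp
  | cons v vs ih =>
      simp only [List.foldl_cons, ih, PySem.Set.mem_update, List.mem_cons]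
      constructor
      · rintro (( h | h) | ⟨w, hw, hxw⟩)
        · exact Or.inl h
        · exact Or.inr ⟨v, Or.inl rfl, h⟩
        · exact Or.inr ⟨w, Or.inr hw, hxw⟩
      · rintro (h | ⟨w, (rfl | hw), hxw⟩)
        · exact Or.inl (Or.inl h)
        · exact Or.inl (Or.inr hxw)
        · exact Or.inr ⟨w, hw, hxw⟩

theorem pv_nodup_foldl_update (vs : List (List String)) (init : List String) (h : init.Nodup) :
    (vs.foldl (fun s v => PySem.Set.update s v) init).Nodup := by
  induction vs generalizing init with
  | nil => exact h
  | cons v vs ih => exact ih _ (PySem.Set.nodup_update _ _ h)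

theorem pv_mem_foldl_inter (f : String → List String) (os : List String) (init : List String)
    (x : String) :
    x ∈ os.foldl (fun r o => PySem.Set.inter r (f o)) init ↔ x ∈ init ∧ ∀ o ∈ os, x ∈ f o := by
  induction os generalizing init with
  | nil => simp
  | cons o os ih =>
      simp only [List.foldl_cons, ih, PySem.Set.mem_inter, List.mem_cons]
      constructor
      · rintro ⟨⟨h1, h2⟩, h3⟩
        exact ⟨h1, fun o' ho' => ho'.elim (fun e => e ▸ h2) (h3 o')⟩
      · rintro ⟨h1, h2⟩
        exact ⟨⟨h1, h2 o (Or.inl rfl)⟩, fun o' ho' => h2 o' (Or.inr ho')⟩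

theorem pv_nodup_foldl_inter (f : String → List String) (os : List String) (init : List String)
    (h : init.Nodup) :
    (os.foldl (fun r o => PySem.Set.inter r (f o)) init).Nodup := by
  induction os generalizing init with
  | nil => exact h
  | cons o os ih => exact ih _ (PySem.Set.nodup_inter _ _ h)

theorem pv_mem_unionValues (ctx : PySem.Dict String (List String)) (x : String) :
    x ∈ pvUnionValues ctx ↔ ∃ p ∈ ctx.items, x ∈ p.2 := by
  unfold pvUnionValues
  rw [pv_mem_foldl_update]
  simp only [PySem.Dict.values, PySem.Set.empty, List.mem_map, List.not_mem_nil, false_or]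
  constructor
  · rintro ⟨v, ⟨p, hp, rfl⟩, hxv⟩
    exact ⟨p, hp, hxv⟩
  · rintro ⟨p, hp, hxp⟩
    exact ⟨p.2, ⟨p, hp, rfl⟩, hxp⟩

theorem pv_nodup_unionValues (ctx : PySem.Dict String (List String)) :
    (pvUnionValues ctx).Nodup :=
  pv_nodup_foldl_update _ _ (by simp [PySem.Set.empty])

-- the seeded intersection loop of prime_attributes, over the keys of a sublist fl of items
theorem pv_primeAttributes_char (ctx : PySem.Dict String (List String)) (hnd : ctx.keys.Nodup)
    (fl : List (String × List String)) (hsub : ∀ q ∈ fl, q ∈ ctx.items) (h0 : fl ≠ []) :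
    (pvPrimeAttributes ctx (fl.map (·.1))).Nodup ∧
      ∀ x, (x ∈ pvPrimeAttributes ctx (fl.map (·.1)) ↔ ∀ q ∈ fl, x ∈ q.2) := by
  have hget : ∀ r ∈ fl, ctx.getD r.1 [] = r.2 := fun r hr =>
    PySem.Dict.getD_of_mem_items ctx (by simpa using hsub r hr) hnd []
  match fl, h0 with
  | q :: qs, _ =>
    unfold pvPrimeAttributes
    rw [if_neg (by simp)]
    simp only [List.map_cons, List.foldl_cons]
    rw [pv_foldl_opt (fun r obj => PySem.Set.inter r (ctx.getD obj []))
        (fun obj => PySem.Set.ofList (ctx.getD obj []))]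
    simp only [Option.getD_some]
    refine ⟨pv_nodup_foldl_inter _ _ _ (PySem.Set.nodup_ofList _), fun x => ?_⟩
    rw [pv_mem_foldl_inter]
    rw [hget q (by simp)]
    simp only [PySem.Set.mem_ofList, List.mem_map, List.mem_cons]
    constructor
    · rintro ⟨h1, h2⟩ r (rfl | hr)
      · exact h1
      · have := h2 r.1 ⟨r, hr, rfl⟩
        rwa [hget r (by simp [hr])] at this
    · rintro h
      refine ⟨h q (Or.inl rfl), ?_⟩
      rintro o ⟨r, hr, rfl⟩
      rw [hget r (by simp [hr])]
      exact h r (Or.inr hr)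

-- A's closure of the empty premise
theorem pv_closure_empty_char (ctx : PySem.Dict String (List String)) (hnd : ctx.keys.Nodup) :
    (pvClosure ctx []).Nodup ∧
      ∀ x, (x ∈ pvClosure ctx [] ↔ ctx.items ≠ [] ∧ ∀ p ∈ ctx.items, x ∈ p.2) := by
  unfold pvClosure pvPrimeObjects
  rw [if_pos rfl, PySem.Set.ofList_eq_self_of_nodup _ hnd]
  cases hitems : ctx.items with
  | nil =>
      have hkeys : ctx.keys = [] := by simp [PySem.Dict.keys, hitems]
      rw [hkeys]
      unfold pvPrimeAttributes
      rw [if_pos rfl, if_pos hitems]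
      simp
  | cons p rest =>
      have hkeys : ctx.keys = ((p :: rest).map (·.1)) := by simp [PySem.Dict.keys, hitems]
      rw [hkeys]
      have hchar := pv_primeAttributes_char ctx hnd (p :: rest)
        (fun q hq => by rw [hitems]; exact hq) (by simp)
      refine ⟨hchar.1, fun x => ?_⟩
      rw [hchar.2 x]
      simp

-- A's closure of a singleton premise {attr}, for attr occurring in some row
theorem pv_closure_single_char (ctx : PySem.Dict String (List String)) (hnd : ctx.keys.Nodup)
    (attr : String) (p0 : String × List String) (hp0 : p0 ∈ ctx.items) (ha : attr ∈ p0.2) :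
    (pvClosure ctx [attr]).Nodup ∧
      ∀ x, (x ∈ pvClosure ctx [attr] ↔ ∀ p ∈ ctx.items, attr ∈ p.2 → x ∈ p.2) := by
  unfold pvClosure pvPrimeObjects
  rw [if_neg (by simp)]
  have hmemfl : ∀ p, p ∈ ctx.items.filter (fun p => PySem.Set.issubset [attr] p.2) ↔
      p ∈ ctx.items ∧ attr ∈ p.2 := by
    intro p
    rw [List.mem_filter]
    simp [PySem.Set.issubset_iff]
  have hflsub : ∀ q ∈ ctx.items.filter (fun p => PySem.Set.issubset [attr] p.2), q ∈ ctx.items :=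
    fun q hq => ((hmemfl q).1 hq).1
  have h0 : ctx.items.filter (fun p => PySem.Set.issubset [attr] p.2) ≠ [] :=
    List.ne_nil_of_mem ((hmemfl p0).2 ⟨hp0, ha⟩)
  have hndfl : ((ctx.items.filter (fun p => PySem.Set.issubset [attr] p.2)).map (·.1)).Nodup := by
    have hsl : ((ctx.items.filter (fun p => PySem.Set.issubset [attr] p.2)).map (·.1)).Sublist
        (ctx.items.map (·.1)) := List.Sublist.map _ List.filter_sublist
    exact hsl.nodup (by simpa [PySem.Dict.keys] using hnd)
  rw [PySem.Set.ofList_eq_self_of_nodup _ hndfl]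
  have hchar := pv_primeAttributes_char ctx hnd _ hflsub h0
  refine ⟨hchar.1, fun x => ?_⟩
  rw [hchar.2 x]
  constructor
  · intro h p hp hap
    exact h p ((hmemfl p).2 ⟨hp, hap⟩)
  · intro h q hq
    obtain ⟨hq1, hq2⟩ := (hmemfl q).1 hq
    exact h q hq1 hq2

theorem pv_extent_mem (items : List (String × List String)) (b y : String) :
    y ∈ pvExtent items b ↔ ∃ p ∈ items, b ∈ p.2 ∧ p.1 = y := by
  unfold pvExtent
  simp [PySem.Set.mem_ofList, List.mem_map, List.mem_filter, and_comm]

theorem pv_equal_extent_iff (ctx : PySem.Dict String (List String)) (hnd : ctx.keys.Nodup)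
    (b : String) :
    (PySem.Set.equal (pvExtent ctx.items b) (PySem.Set.ofList ctx.keys) = true) ↔
      ∀ p ∈ ctx.items, b ∈ p.2 := by
  rw [PySem.Set.equal_iff]
  constructor
  · intro h p hp
    have hk : p.1 ∈ PySem.Set.ofList ctx.keys := by
      simp only [PySem.Set.mem_ofList, PySem.Dict.keys, List.mem_map]
      exact ⟨p, hp, rfl⟩
    obtain ⟨q, hq, hbq, he⟩ := (pv_extent_mem ctx.items b p.1).1 ((h p.1).2 hk)
    have := pv_key_inj ctx hnd hq hp he
    rwa [this] at hbq
  · intro h y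
    rw [pv_extent_mem]
    simp only [PySem.Set.mem_ofList, PySem.Dict.keys, List.mem_map]
    constructor
    · rintro ⟨p, hp, _, he⟩
      exact ⟨p, hp, he⟩
    · rintro ⟨p, hp, he⟩
      exact ⟨p, hp, h p hp, he⟩

theorem pv_issubset_extent_iff (ctx : PySem.Dict String (List String)) (hnd : ctx.keys.Nodup)
    (attr b : String) :
    (PySem.Set.issubset (pvExtent ctx.items attr) (pvExtent ctx.items b) = true) ↔
      ∀ p ∈ ctx.items, attr ∈ p.2 → b ∈ p.2 := by
  rw [PySem.Set.issubset_iff]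
  constructor
  · intro h p hp hap
    obtain ⟨q, hq, hbq, he⟩ := (pv_extent_mem ctx.items b p.1).1
      (h p.1 ((pv_extent_mem ctx.items attr p.1).2 ⟨p, hp, hap, rfl⟩))
    have := pv_key_inj ctx hnd hq hp he
    rwa [this] at hbq
  · intro h y hy
    obtain ⟨p, hp, hap, he⟩ := (pv_extent_mem ctx.items attr y).1 hy
    exact (pv_extent_mem ctx.items b y).2 ⟨p, hp, h p hp hap, he⟩

-- lookup in the extent dict built by B's comprehension
theorem pv_getD_foldl_insert_fn (f : String → List String) (l : List String)
    (d : PySem.Dict String (List String)) (b : String) (d0 : List String) :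
    (l.foldl (fun d x => d.insert x (f x)) d).getD b d0 =
      if b ∈ l then f b else d.getD b d0 := by
  induction l generalizing d with
  | nil => simp
  | cons x xs ih =>
      rw [List.foldl_cons, ih]
      by_cases hxs : b ∈ xs
      · rw [if_pos hxs, if_pos (List.mem_cons.2 (Or.inr hxs))]
      · rw [if_neg hxs, PySem.Dict.getD_insert]
        by_cases hbx : b = x
        · rw [if_pos hbx, if_pos (List.mem_cons.2 (Or.inl hbx)), hbx]
        · rw [if_neg hbx, if_neg (by simp [hbx, hxs])]

theorem pv_main (context : List (String × List String)) :
    find_implications context = find_implications_alt context := by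
  have hnd : (PySem.Dict.ofList context).keys.Nodup := PySem.Dict.nodup_keys_ofList context
  set ctx := PySem.Dict.ofList context with hctx
  simp only [find_implications, find_implications_alt, ← hctx]
  -- B's extent dict looks up the extents it was built from
  have hE : ∀ b ∈ pvUnionValues ctx,
      ((pvUnionValues ctx).foldl (fun d b => d.insert b (pvExtent ctx.items b))
        (PySem.Dict.empty : PySem.Dict String (List String))).getD b [] = pvExtent ctx.items b := by
    intro b hb
    rw [pv_getD_foldl_insert_fn, if_pos hb]
  have hEqf : (pvUnionValues ctx).filter (fun b => PySem.Set.equal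
        (((pvUnionValues ctx).foldl (fun d b => d.insert b (pvExtent ctx.items b))
          (PySem.Dict.empty : PySem.Dict String (List String))).getD b [])
        (PySem.Set.ofList ctx.keys)) =
      (pvUnionValues ctx).filter
        (fun b => PySem.Set.equal (pvExtent ctx.items b) (PySem.Set.ofList ctx.keys)) :=
    List.filter_congr (fun x hx => by rw [hE x hx])
  rw [hEqf]
  -- the empty-premise implication lists agree
  have hcA := pv_closure_empty_char ctx hnd
  have hBnodup : ((pvUnionValues ctx).filter
      (fun b => PySem.Set.equal (pvExtent ctx.items b) (PySem.Set.ofList ctx.keys))).Nodup :=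
    (pv_nodup_unionValues ctx).filter _
  have hBmem : ∀ x, x ∈ (pvUnionValues ctx).filter
      (fun b => PySem.Set.equal (pvExtent ctx.items b) (PySem.Set.ofList ctx.keys)) ↔
      (ctx.items ≠ [] ∧ ∀ p ∈ ctx.items, x ∈ p.2) := by
    intro x
    rw [List.mem_filter, pv_equal_extent_iff ctx hnd x, pv_mem_unionValues]
    constructor
    · rintro ⟨⟨p, hp, _⟩, h2⟩
      exact ⟨List.ne_nil_of_mem hp, h2⟩
    · rintro ⟨h1, h2⟩
      obtain ⟨p, hp⟩ := List.exists_mem_of_ne_nil _ h1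
      exact ⟨⟨p, hp, h2 p hp⟩, h2⟩
  have hpermc : (pvClosure ctx []).Perm ((pvUnionValues ctx).filter
      (fun b => PySem.Set.equal (pvExtent ctx.items b) (PySem.Set.ofList ctx.keys))) :=
    (List.perm_ext_iff_of_nodup hcA.1 hBnodup).mpr
      (fun x => by rw [hcA.2 x, hBmem x])
  have hnilc : (pvClosure ctx [] = []) ↔ ((pvUnionValues ctx).filter
      (fun b => PySem.Set.equal (pvExtent ctx.items b) (PySem.Set.ofList ctx.keys)) = []) := by
    constructor <;> intro e
    · exact (e ▸ hpermc).symm.eq_nil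
    · exact (e ▸ hpermc).eq_nil
  have hsortc : pvSortedSet (pvClosure ctx []) = pvSortedSet ((pvUnionValues ctx).filter
      (fun b => PySem.Set.equal (pvExtent ctx.items b) (PySem.Set.ofList ctx.keys))) := by
    unfold pvSortedSet
    exact (PySem.List.sorted_id_eq_sorted_id_iff_perm _ _).mpr hpermc
  have himpl : (if pvClosure ctx [] = [] then ([] : List (List String × List String))
        else [(([] : List String), pvSortedSet (pvClosure ctx []))]) =
      (if (pvUnionValues ctx).filter
          (fun b => PySem.Set.equal (pvExtent ctx.items b) (PySem.Set.ofList ctx.keys)) = []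
        then ([] : List (List String × List String))
        else [(([] : List String), pvSortedSet ((pvUnionValues ctx).filter
          (fun b => PySem.Set.equal (pvExtent ctx.items b) (PySem.Set.ofList ctx.keys))))]) := by
    by_cases h : pvClosure ctx [] = []
    · rw [if_pos h, if_pos (hnilc.1 h)]
    · rw [if_neg h, if_neg (fun e => h (hnilc.2 e)), hsortc]
  rw [himpl]
  -- the per-attribute loop bodies agree on every attribute of all_attrs
  apply PySem.List.foldl_congr_mem
  intro acc attr hattr
  have hattrU : attr ∈ pvUnionValues ctx := (PySem.List.mem_sorted _ _ _ _).1 hattr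
  have hSubf : (pvUnionValues ctx).filter (fun b => PySem.Set.issubset
        (((pvUnionValues ctx).foldl (fun d b => d.insert b (pvExtent ctx.items b))
          (PySem.Dict.empty : PySem.Dict String (List String))).getD attr [])
        (((pvUnionValues ctx).foldl (fun d b => d.insert b (pvExtent ctx.items b))
          (PySem.Dict.empty : PySem.Dict String (List String))).getD b [])) =
      (pvUnionValues ctx).filter
        (fun b => PySem.Set.issubset (pvExtent ctx.items attr) (pvExtent ctx.items b)) :=
    List.filter_congr (fun x hx => by rw [hE attr hattrU, hE x hx])
  rw [hSubf]
  obtain ⟨p0, hp0, ha⟩ := (pv_mem_unionValues ctx attr).1 hattrU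
  have hA := pv_closure_single_char ctx hnd attr p0 hp0 ha
  have hBnod : ((pvUnionValues ctx).filter
      (fun b => PySem.Set.issubset (pvExtent ctx.items attr) (pvExtent ctx.items b))).Nodup :=
    (pv_nodup_unionValues ctx).filter _
  have hBm : ∀ x, x ∈ (pvUnionValues ctx).filter
      (fun b => PySem.Set.issubset (pvExtent ctx.items attr) (pvExtent ctx.items b)) ↔
      ∀ p ∈ ctx.items, attr ∈ p.2 → x ∈ p.2 := by
    intro x
    rw [List.mem_filter, pv_issubset_extent_iff ctx hnd attr x]
    constructor
    · rintro ⟨_, h2⟩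
      exact h2
    · intro h
      exact ⟨(pv_mem_unionValues ctx x).2 ⟨p0, hp0, h p0 hp0 ha⟩, h⟩
  have hmem : ∀ x, x ∈ pvClosure ctx [attr] ↔ x ∈ (pvUnionValues ctx).filter
      (fun b => PySem.Set.issubset (pvExtent ctx.items attr) (pvExtent ctx.items b)) :=
    fun x => by rw [hA.2 x, hBm x]
  have hperm : (pvClosure ctx [attr]).Perm ((pvUnionValues ctx).filter
      (fun b => PySem.Set.issubset (pvExtent ctx.items attr) (pvExtent ctx.items b))) :=
    (List.perm_ext_iff_of_nodup hA.1 hBnod).mpr hmem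
  have hguard : (PySem.Set.diff (pvClosure ctx [attr]) [attr] = []) ↔
      (PySem.Set.diff ((pvUnionValues ctx).filter
        (fun b => PySem.Set.issubset (pvExtent ctx.items attr) (pvExtent ctx.items b))) [attr] = []) := by
    simp only [List.eq_nil_iff_forall_not_mem, PySem.Set.mem_diff, hmem]
  have hsort : pvSortedSet (pvClosure ctx [attr]) = pvSortedSet ((pvUnionValues ctx).filter
      (fun b => PySem.Set.issubset (pvExtent ctx.items attr) (pvExtent ctx.items b))) := by
    unfold pvSortedSet
    exact (PySem.List.sorted_id_eq_sorted_id_iff_perm _ _).mpr hperm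
  by_cases h : PySem.Set.diff (pvClosure ctx [attr]) [attr] = []
  · rw [if_pos h, if_pos (hguard.1 h)]
  · rw [if_neg h, if_neg (fun e => h (hguard.2 e)), hsort]

-- ===== VERDICT (by name: the statement is the Claim_ definition above) =====
theorem find_implications_spec : Claim_equal_find_implications := by
  intro context _
  unfold Spec_find_implications
  exact pv_main context
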